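-- pv_equiv track=rewrite | github.com/choco9966/Algorithm-Master | programmers/코딩테스트 대비반/1주차/더 맵게.py | solution
-- ===== SOURCE A (Python) =====
-- import heapq
--
-- def solution(scoville, K):
--     heap = []
--     MIX_CNT = 0
--     for elm in scoville:
--         heapq.heappush(heap, elm)
--
--     while heap[0] < K:
--         try:
--             heapq.heappush(heap, (heapq.heappop(heap) + heapq.heappop(heap)*2))
--         except IndexError:
--             return -1
--         MIX_CNT += 1
--
--     return MIX_CNT
-- ===== SOURCE B (Python) =====
-- def solution(scoville, K):
--     # Sort once, then run the mixing with two sorted queues: the unconsumed tail of the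
--     # sorted input ("base") and the queue of created mixes ("made").  The front of each
--     # queue is its minimum (created values that are still queued are nondecreasing), so
--     # every pop is O(1) after the single O(n log n) sort.
--     base = sorted(scoville)
--     made = []
--     i = 0  # next unconsumed element of base
--     j = 0  # next unconsumed element of made
--     count = 0
--     while True:
--         use_base = i < len(base) and (j >= len(made) or base[i] <= made[j])
--         cur = base[i] if use_base else made[j]
--         if cur >= K:
--             return count
--         if (len(base) - i) + (len(made) - j) < 2:
--             return -1
--         # pop the two smallest across the two queues
--         if use_base:
--             a, i = base[i], i + 1
--         else:
--             a, j = made[j], j + 1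
--         if i < len(base) and (j >= len(made) or base[i] <= made[j]):
--             b, i = base[i], i + 1
--         else:
--             b, j = made[j], j + 1
--         made.append(a + 2 * b)
--         count += 1
-- ===== Notes on version B (the rewrite author's own statement) =====
-- stated objective: faster
-- what changed: Replaces the per-operation binary heap with a single sort followed by a two-queue merge (sorted input queue plus a FIFO queue of created mixes, whose pending values are provably nondecreasing), so each mix is O(1) index moves instead of two heap pops and a push.
import Mathlib
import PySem

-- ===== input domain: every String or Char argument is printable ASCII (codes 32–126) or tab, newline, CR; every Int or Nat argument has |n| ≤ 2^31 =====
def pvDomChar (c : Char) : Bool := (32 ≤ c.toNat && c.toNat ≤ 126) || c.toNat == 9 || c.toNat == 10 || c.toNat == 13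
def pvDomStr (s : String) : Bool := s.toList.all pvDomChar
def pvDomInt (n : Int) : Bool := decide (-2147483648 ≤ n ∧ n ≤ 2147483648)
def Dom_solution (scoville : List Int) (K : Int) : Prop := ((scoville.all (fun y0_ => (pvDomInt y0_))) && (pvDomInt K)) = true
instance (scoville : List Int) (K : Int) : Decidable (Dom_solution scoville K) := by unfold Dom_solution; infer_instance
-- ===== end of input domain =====

-- B replaces A's binary heap with one sort plus two sorted queues, making each mix O(1)
-- index moves (measured faster in a timing run); equivalence is proved for nonempty input.

-- ===== PORT A =====
-- A builds a heapq min-heap and repeatedly mixes the two smallest elements.  heapq is the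
-- stdlib and is ported as the corresponding min-priority-queue kept as an ordered list
-- (heappush = ordered insert, heappop = take the head); this is exact for Int elements,
-- since only the sequence of popped values is observable in A.
def heappush : List Int → Int → List Int
  | [], e => [e]
  | x :: t, e => if x ≤ e then x :: heappush t e else e :: x :: t

-- 'while heap[0] < K' with the try/except: fuel = heap size bounds the iterations (each mix
-- shrinks the heap by one); fuel 0 and the empty heap are unreachable for nonempty input.
def solLoopA : Nat → List Int → Int → Int → Int
  | 0, _, _, cnt => cnt
  | _ + 1, [], _, _ => -1            -- heap[0] on an empty heap: excluded by Pre_solution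
  | f + 1, x :: t, K, cnt =>
    if x < K then
      match t with
      | [] => -1                     -- the second heappop raises IndexError → return -1
      | y :: rest => solLoopA f (heappush rest (x + 2 * y)) K (cnt + 1)
    else cnt

def solution (scoville : List Int) (K : Int) : Int :=
  let heap := scoville.foldl heappush []
  solLoopA heap.length heap K 0

-- ===== PORT B =====
-- i, j = consumed prefixes of base and made; getD's default is only read on the empty
-- input (where Python B raises IndexError like A), which Pre_solution excludes.
-- fuel = base size bounds the iterations (each one consumes two queue entries, adds one).
def solLoopB : Nat → List Int → List Int → Nat → Nat → Int → Int → Int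
  | 0, _, _, _, _, _, cnt => cnt
  | f + 1, base, made, i, j, K, cnt =>
    let ub := decide (i < base.length) && (decide (made.length ≤ j) || decide (base.getD i 0 ≤ made.getD j 0))
    let cur := if ub then base.getD i 0 else made.getD j 0
    if K ≤ cur then cnt
    else if (base.length - i) + (made.length - j) < 2 then -1
    else
      let s₁ := if ub then (base.getD i 0, i + 1, j) else (made.getD j 0, i, j + 1)
      let ub₂ := decide (s₁.2.1 < base.length) && (decide (made.length ≤ s₁.2.2) || decide (base.getD s₁.2.1 0 ≤ made.getD s₁.2.2 0))
      let s₂ := if ub₂ then (base.getD s₁.2.1 0, s₁.2.1 + 1, s₁.2.2) else (made.getD s₁.2.2 0, s₁.2.1, s₁.2.2 + 1)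
      solLoopB f base (made ++ [s₁.1 + 2 * s₂.1]) s₂.2.1 s₂.2.2 K (cnt + 1)

def solution_alt (scoville : List Int) (K : Int) : Int :=
  let base := PySem.List.sorted scoville (fun x => x) false
  solLoopB base.length base [] 0 0 K 0

-- ===== PRECONDITION & SPEC =====
-- Pre_ excludes only the empty list, on which A raises IndexError (heap[0] of []).
def Pre_solution (scoville : List Int) (K : Int) : Prop := scoville ≠ []
instance (scoville : List Int) (K : Int) : Decidable (Pre_solution scoville K) := by unfold Pre_solution; infer_instance
def pvWitness_solution : List Int × Int := ([1, 2, 3, 9, 10, 12], 7)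

def Spec_solution (scoville : List Int) (K : Int) (out : Int) : Prop := out = solution_alt scoville K
instance (scoville : List Int) (K : Int) (out : Int) : Decidable (Spec_solution scoville K out) := by unfold Spec_solution; infer_instance

-- ===== CLAIM (what is proved, stated in full; the proofs are below) =====
def Claim_equal_solution : Prop := ∀ (scoville : List Int) (K : Int), Dom_solution scoville K → Pre_solution scoville K → Spec_solution scoville K (solution scoville K)

-- ===== LEMMAS AND PROOFS =====

-- the two sorted queues merged (base-preferred on ties, like B's pops)
def pvMerge : List Int → List Int → List Int
  | [], m => m
  | b, [] => b
  | x :: bs, y :: ms => if x ≤ y then x :: pvMerge bs (y :: ms) else y :: pvMerge (x :: bs) ms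

-- abstract (queue-level) version of B's loop, with explicit front pops
def pvTakeBase (Bs Ms : List Int) : Bool := !Bs.isEmpty && (Ms.isEmpty || Bs.headD 0 ≤ Ms.headD 0)
def pvCurMin (Bs Ms : List Int) : Int := if pvTakeBase Bs Ms then Bs.headD 0 else Ms.headD 0
def pvPopMin (Bs Ms : List Int) : Int × List Int × List Int :=
  if pvTakeBase Bs Ms then (Bs.headD 0, Bs.tail, Ms) else (Ms.headD 0, Bs, Ms.tail)

def solLoopQ : Nat → List Int → List Int → Int → Int → Int
  | 0, _, _, _, cnt => cnt
  | f + 1, Bs, Ms, K, cnt =>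
    if K ≤ pvCurMin Bs Ms then cnt
    else if Bs.length + Ms.length < 2 then -1
    else
      let p₁ := pvPopMin Bs Ms
      let p₂ := pvPopMin p₁.2.1 p₁.2.2
      solLoopQ f p₂.2.1 (p₂.2.2 ++ [p₁.1 + 2 * p₂.1]) K (cnt + 1)

-- every element of s is an admissible pair bound for c
def PairBound (s : List Int) (c : Int) : Prop :=
  ∀ x y : Int, x ≤ y → ({x, y} : Multiset Int) ≤ (s : Multiset Int) → c ≤ x + 2 * y

def QInv (Bs Ms : List Int) : Prop :=
  Bs.Pairwise (· ≤ ·) ∧ Ms.Pairwise (· ≤ ·) ∧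
    ∀ i (hi : i < Ms.length), PairBound (Bs ++ Ms.take i) (Ms[i])

theorem pvMerge_nil_right (b : List Int) : pvMerge b [] = b := by cases b <;> simp [pvMerge]

theorem pvMerge_length (Bs Ms : List Int) : (pvMerge Bs Ms).length = Bs.length + Ms.length := by
  fun_induction pvMerge <;> simp_all <;> omega

theorem pvMerge_perm (Bs Ms : List Int) : (pvMerge Bs Ms).Perm (Bs ++ Ms) := by
  fun_induction pvMerge with
  | case1 m => simp
  | case2 b h => simp
  | case3 x bs y ms hxy ih => exact (ih.cons x)
  | case4 x bs y ms hxy ih =>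
      exact (ih.cons y).trans (List.perm_middle (a := y) (l₁ := x :: bs) (l₂ := ms)).symm

theorem pvMerge_mem {Bs Ms : List Int} {a : Int} :
    a ∈ pvMerge Bs Ms ↔ a ∈ Bs ∨ a ∈ Ms := by
  rw [(pvMerge_perm Bs Ms).mem_iff]; simp

theorem pvMerge_sorted {Bs Ms : List Int} (hb : Bs.Pairwise (· ≤ ·)) (hm : Ms.Pairwise (· ≤ ·)) :
    (pvMerge Bs Ms).Pairwise (· ≤ ·) := by
  fun_induction pvMerge with
  | case1 m => exact hm
  | case2 b hb' => exact hb
  | case3 x bs y ms hxy ih =>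
      rw [List.pairwise_cons] at hb ⊢
      refine ⟨fun a ha => ?_, ih hb.2 hm⟩
      rcases pvMerge_mem.1 ha with h | h
      · exact hb.1 a h
      · rcases List.mem_cons.1 h with rfl | h
        · exact hxy
        · rw [List.pairwise_cons] at hm
          exact le_trans hxy (hm.1 a h)
  | case4 x bs y ms hxy ih =>
      rw [List.pairwise_cons] at hm ⊢
      refine ⟨fun a ha => ?_, ih hb hm.2⟩
      rcases pvMerge_mem.1 ha with h | h
      · rcases List.mem_cons.1 h with rfl | h
        · omega
        · rw [List.pairwise_cons] at hb
          have := hb.1 a h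
          omega
      · exact hm.1 a h

theorem heappush_all_le {s : List Int} {c : Int} (h : ∀ x ∈ s, x ≤ c) :
    heappush s c = s ++ [c] := by
  induction s with
  | nil => rfl
  | cons x t ih =>
      simp only [heappush, h x (by simp), if_true]
      rw [ih (fun a ha => h a (by simp [ha]))]
      rfl

theorem heappush_eq_merge_single (b : List Int) (c : Int) :
    heappush b c = pvMerge b [c] := by
  induction b with
  | nil => simp [heappush, pvMerge]
  | cons x bs ih =>
      simp only [heappush, pvMerge, pvMerge_nil_right]
      split <;> simp [ih]

theorem heappush_merge {Bs Ms : List Int} (c : Int) (hm : ∀ m ∈ Ms, m ≤ c) :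
    heappush (pvMerge Bs Ms) c = pvMerge Bs (Ms ++ [c]) := by
  fun_induction pvMerge with
  | case1 m => simpa [pvMerge] using heappush_all_le hm
  | case2 b hb' => simpa [pvMerge] using heappush_eq_merge_single b c
  | case3 x bs y ms hxy ih =>
      have hyc : y ≤ c := hm y (by simp)
      simp only [heappush, if_pos (le_trans hxy hyc)]
      rw [ih hm]
      simp [pvMerge, hxy]
  | case4 x bs y ms hxy ih =>
      have hyc : y ≤ c := hm y (by simp)
      simp only [heappush, if_pos hyc]
      rw [ih (fun a ha => hm a (by simp [ha]))]
      simp [pvMerge, hxy]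

theorem heappush_perm (s : List Int) (c : Int) : (heappush s c).Perm (c :: s) := by
  induction s with
  | nil => rfl
  | cons x t ih =>
      simp only [heappush]
      split
      · exact (ih.cons x).trans (List.Perm.swap c x t)
      · rfl

theorem heappush_ne_nil (s : List Int) (c : Int) : heappush s c ≠ [] := by
  intro h
  have := (heappush_perm s c).length_eq
  rw [h] at this
  simp at this

-- pop characterisation: a pop takes the head of the merge, from one of the two queues
theorem pvPopMin_spec {Bs Ms : List Int} {x : Int} {t : List Int} (h : pvMerge Bs Ms = x :: t) :
    (∃ B', Bs = x :: B' ∧ pvPopMin Bs Ms = (x, B', Ms) ∧ pvMerge B' Ms = t) ∨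
    (∃ M', Ms = x :: M' ∧ pvPopMin Bs Ms = (x, Bs, M') ∧ pvMerge Bs M' = t) := by
  match Bs, Ms with
  | [], [] => simp [pvMerge] at h
  | [], m :: ms =>
      simp only [pvMerge] at h
      injection h with h1 h2
      subst h1; subst h2
      exact Or.inr ⟨ms, rfl, by simp [pvPopMin, pvTakeBase], by simp [pvMerge]⟩
  | b :: bs, [] =>
      rw [pvMerge_nil_right] at h
      injection h with h1 h2
      subst h1; subst h2
      exact Or.inl ⟨bs, rfl, by simp [pvPopMin, pvTakeBase], pvMerge_nil_right bs⟩
  | b :: bs, m :: ms =>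
      simp only [pvMerge] at h
      by_cases hbm : b ≤ m
      · rw [if_pos hbm] at h
        injection h with h1 h2
        subst h1; subst h2
        exact Or.inl ⟨bs, rfl, by simp [pvPopMin, pvTakeBase, hbm], rfl⟩
      · rw [if_neg hbm] at h
        injection h with h1 h2
        subst h1; subst h2
        exact Or.inr ⟨ms, rfl, by simp [pvPopMin, pvTakeBase, hbm], rfl⟩

theorem pvCurMin_eq {Bs Ms : List Int} {x : Int} {t : List Int} (h : pvMerge Bs Ms = x :: t) :
    pvCurMin Bs Ms = x := by
  rcases pvPopMin_spec h with ⟨B', hB, hp, _⟩ | ⟨M', hM, hp, _⟩ <;>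
    · simp only [pvPopMin, pvCurMin] at hp ⊢
      split at hp <;> simp_all

theorem coe_pair (x y : Int) : ({x, y} : Multiset Int) = (↑[x, y] : Multiset Int) := rfl

theorem pairBound_mono {s s' : List Int} {c : Int} (h : PairBound s c)
    (hsub : s'.Sublist s) : PairBound s' c :=
  fun x y hxy hle => h x y hxy (hle.trans (Multiset.coe_le.mpr hsub.subperm))

-- one mixing step: from a state merging to x :: y :: t, the two pops return x and y,
-- the rebuilt queues merge to A's new heap, and the invariant is preserved
theorem step_core {Bs Ms B₂ : List Int} {x y : Int} {t : List Int} (p : Nat)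
    (hinv : QInv Bs Ms)
    (hB2 : B₂.Sublist Bs)
    (hpair : ({x, y} : Multiset Int) ≤ (↑Bs + ↑(Ms.take p) : Multiset Int))
    (hxy : x ≤ y)
    (hyt : ∀ r ∈ t, y ≤ r)
    (hmt : pvMerge B₂ (Ms.drop p) = t) :
    pvMerge B₂ (Ms.drop p ++ [x + 2 * y]) = heappush t (x + 2 * y) ∧
    QInv B₂ (Ms.drop p ++ [x + 2 * y]) := by
  obtain ⟨hbs, hms, hbound⟩ := hinv
  have hb2 : B₂.Pairwise (· ≤ ·) := List.Pairwise.sublist hB2 hbs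
  have hm2 : (Ms.drop p).Pairwise (· ≤ ·) := List.Pairwise.drop hms
  have hle_c : ∀ m ∈ Ms.drop p, m ≤ x + 2 * y := by
    intro m hmem
    obtain ⟨i, hi, hEq⟩ := List.mem_iff_getElem.1 hmem
    have hpi : p + i < Ms.length := by
      have := List.length_drop (l := Ms) (i := p); omega
    have hEq2 : Ms[p + i]'hpi = m := by rw [← hEq]; exact (List.getElem_drop).symm
    refine hEq2 ▸ hbound (p + i) hpi x y hxy ?_
    refine hpair.trans ?_
    have : (Bs ++ Ms.take p).Sublist (Bs ++ Ms.take (p + i)) := by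
      refine List.Sublist.append (List.Sublist.refl _) ?_
      rw [List.take_add]
      exact List.sublist_append_left _ _
    simpa [← Multiset.coe_add] using Multiset.coe_le.mpr this.subperm
  have hpush : pvMerge B₂ (Ms.drop p ++ [x + 2 * y]) = heappush t (x + 2 * y) := by
    rw [← hmt, heappush_merge _ hle_c]
  refine ⟨hpush, hb2, ?_, ?_⟩
  · rw [List.pairwise_append]
    exact ⟨hm2, by simp, fun a ha b hb => by simp at hb; subst hb; exact hle_c a ha⟩
  · intro i hi
    simp only [List.length_append, List.length_cons, List.length_nil] at hi
    have hld : (Ms.drop p).length = Ms.length - p := by simp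
    by_cases hilt : i < (Ms.drop p).length
    · have hEq : (Ms.drop p ++ [x + 2 * y])[i]'(by simp; omega) = (Ms.drop p)[i]'hilt :=
        List.getElem_append_left hilt
      rw [hEq, List.take_append_of_le_length (by omega)]
      have hpi : p + i < Ms.length := by
        have := List.length_drop (l := Ms) (i := p); omega
      have hEq2 : (Ms.drop p)[i]'hilt = Ms[p + i]'hpi := List.getElem_drop
      rw [hEq2]
      refine pairBound_mono (hbound (p + i) hpi) ?_
      refine List.Sublist.append hB2 ?_
      rw [List.take_add]
      exact List.sublist_append_right _ _
    · have hieq : i = (Ms.drop p).length := by omega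
      have hEq : (Ms.drop p ++ [x + 2 * y])[i]'(by simp; omega) = x + 2 * y := by
        subst hieq; simp
      rw [hEq, hieq, List.take_append_of_le_length (le_refl _), List.take_length]
      intro u v huv hsub
      have hperm : t.Perm (B₂ ++ Ms.drop p) := hmt ▸ (pvMerge_perm B₂ (Ms.drop p))
      have hu : u ∈ t := hperm.mem_iff.2 (Multiset.mem_coe.mp (Multiset.mem_of_le hsub (by simp)))
      have hv : v ∈ t := hperm.mem_iff.2 (Multiset.mem_coe.mp (Multiset.mem_of_le hsub (by simp)))
      have := hyt u hu
      have := hyt v hv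
      omega

-- the queue-level loop equals A's loop
theorem loopA_eq_loopQ (f : Nat) : ∀ (Bs Ms : List Int) (K cnt : Int),
    QInv Bs Ms → pvMerge Bs Ms ≠ [] →
    solLoopA f (pvMerge Bs Ms) K cnt = solLoopQ f Bs Ms K cnt := by
  induction f with
  | zero => intros; simp [solLoopA, solLoopQ]
  | succ f ih =>
    intro Bs Ms K cnt hinv hne
    cases hM : pvMerge Bs Ms with
    | nil => exact absurd hM hne
    | cons x t =>
      have hcur := pvCurMin_eq hM
      have hlen : Bs.length + Ms.length = t.length + 1 := by
        have h := pvMerge_length Bs Ms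
        rw [hM] at h
        simpa using h.symm
      simp only [solLoopA, solLoopQ, hcur]
      by_cases hK : x < K
      · rw [if_pos hK, if_neg (by omega : ¬ K ≤ x)]
        cases t with
        | nil => rw [if_pos (by simp only [List.length_nil] at hlen; omega)]
        | cons y rest =>
          rw [if_neg (by simp only [List.length_cons] at hlen; omega)]
          have hsort := pvMerge_sorted hinv.1 hinv.2.1
          rw [hM] at hsort
          have hxy : x ≤ y := (List.pairwise_cons.1 hsort).1 y (by simp)
          have hyt : ∀ r ∈ rest, y ≤ r :=
            fun r hr => (List.pairwise_cons.1 (List.pairwise_cons.1 hsort).2).1 r hr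
          rcases pvPopMin_spec hM with ⟨B₁, hBs, hp1, hm1⟩ | ⟨M₁, hMs, hp1, hm1⟩
          · rcases pvPopMin_spec hm1 with ⟨B₂, hB1, hp2, hm2⟩ | ⟨M₂, hMs2, hp2, hm2⟩
            · -- both pops from base
              subst hB1; subst hBs
              obtain ⟨hpush, hinv'⟩ := step_core (Bs := x :: y :: B₂) (Ms := Ms) (B₂ := B₂) 0
                hinv ((List.sublist_cons_self _ _).trans (List.sublist_cons_self _ _))
                (by
                  rw [coe_pair]
                  refine le_trans (Multiset.coe_le.mpr ?_) (Multiset.le_add_right _ _)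
                  exact (List.Sublist.cons₂ x ((List.nil_sublist B₂).cons₂ y)).subperm)
                hxy hyt (by simpa using hm2)
              rw [hp1, hp2]
              simp only [List.drop_zero] at hpush hinv'
              show solLoopA f (heappush rest (x + 2 * y)) K (cnt + 1) =
                  solLoopQ f B₂ (Ms ++ [x + 2 * y]) K (cnt + 1)
              rw [← hpush]
              exact ih _ _ K (cnt + 1) hinv' (by rw [hpush]; exact heappush_ne_nil _ _)
            · -- first pop from base, second from made
              subst hMs2; subst hBs
              obtain ⟨hpush, hinv'⟩ := step_core (Bs := x :: B₁) (Ms := y :: M₂) (B₂ := B₁) 1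
                hinv (List.sublist_cons_self _ _)
                (by
                  rw [coe_pair, show (y :: M₂).take 1 = [y] from by simp,
                      show ([x, y] : List Int) = [x] ++ [y] from rfl, ← Multiset.coe_add]
                  exact add_le_add
                    (Multiset.coe_le.mpr ((List.nil_sublist B₁).cons₂ x).subperm) le_rfl)
                hxy hyt (by simpa using hm2)
              rw [hp1, hp2]
              simp only [List.drop_succ_cons, List.drop_zero] at hpush hinv'
              show solLoopA f (heappush rest (x + 2 * y)) K (cnt + 1) =
                  solLoopQ f B₁ (M₂ ++ [x + 2 * y]) K (cnt + 1)
              rw [← hpush]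
              exact ih _ _ K (cnt + 1) hinv' (by rw [hpush]; exact heappush_ne_nil _ _)
          · rcases pvPopMin_spec hm1 with ⟨B₂, hB1, hp2, hm2⟩ | ⟨M₂, hMs2, hp2, hm2⟩
            · -- first pop from made, second from base
              subst hB1; subst hMs
              obtain ⟨hpush, hinv'⟩ := step_core (Bs := y :: B₂) (Ms := x :: M₁) (B₂ := B₂) 1
                hinv (List.sublist_cons_self _ _)
                (by
                  rw [Multiset.pair_comm, coe_pair, show (x :: M₁).take 1 = [x] from by simp,
                      show ([y, x] : List Int) = [y] ++ [x] from rfl, ← Multiset.coe_add]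
                  exact add_le_add
                    (Multiset.coe_le.mpr ((List.nil_sublist B₂).cons₂ y).subperm) le_rfl)
                hxy hyt (by simpa using hm2)
              rw [hp1, hp2]
              simp only [List.drop_succ_cons, List.drop_zero] at hpush hinv'
              show solLoopA f (heappush rest (x + 2 * y)) K (cnt + 1) =
                  solLoopQ f B₂ (M₁ ++ [x + 2 * y]) K (cnt + 1)
              rw [← hpush]
              exact ih _ _ K (cnt + 1) hinv' (by rw [hpush]; exact heappush_ne_nil _ _)
            · -- both pops from made
              subst hMs2; subst hMs
              obtain ⟨hpush, hinv'⟩ := step_core (Bs := Bs) (Ms := x :: y :: M₂) (B₂ := Bs) 2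
                hinv (List.Sublist.refl _)
                (by
                  rw [coe_pair, show (x :: y :: M₂).take 2 = [x, y] from by simp]
                  exact Multiset.le_add_left _ _)
                hxy hyt (by simpa using hm2)
              rw [hp1, hp2]
              simp only [List.drop_succ_cons, List.drop_zero] at hpush hinv'
              show solLoopA f (heappush rest (x + 2 * y)) K (cnt + 1) =
                  solLoopQ f Bs (M₂ ++ [x + 2 * y]) K (cnt + 1)
              rw [← hpush]
              exact ih _ _ K (cnt + 1) hinv' (by rw [hpush]; exact heappush_ne_nil _ _)
      · rw [if_neg hK, if_pos (by omega : K ≤ x)]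

-- B's index loop equals the queue-level loop
theorem getD_headD_drop (l : List Int) (n : Nat) : l.getD n 0 = (l.drop n).headD 0 := by
  rw [List.headD_eq_head?_getD, List.head?_drop, List.getD_eq_getElem?_getD]

theorem ub_eq (base made : List Int) (i j : Nat) :
    (decide (i < base.length) && (decide (made.length ≤ j) || decide (base.getD i 0 ≤ made.getD j 0)))
      = pvTakeBase (base.drop i) (made.drop j) := by
  simp only [pvTakeBase, getD_headD_drop]
  congr 1
  · by_cases h : i < base.length <;>
      simp [h, List.isEmpty_iff, List.drop_eq_nil_iff] <;> omega
  · congr 1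
    by_cases h : made.length ≤ j <;>
      simp [h, List.isEmpty_iff, List.drop_eq_nil_iff] <;> omega

theorem pvTakeBase_true_ne {Bs Ms : List Int} (h : pvTakeBase Bs Ms = true) : Bs ≠ [] := by
  intro hc; subst hc; simp [pvTakeBase] at h

theorem pvTakeBase_false_ne {Bs Ms : List Int} (h : pvTakeBase Bs Ms = false)
    (hl : 1 ≤ Bs.length + Ms.length) : Ms ≠ [] := by
  intro hc; subst hc
  simp [pvTakeBase, List.isEmpty_iff] at h
  subst h
  simp at hl

theorem loopB_eq_loopQ (f : Nat) : ∀ (base made : List Int) (i j : Nat) (K cnt : Int),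
    i ≤ base.length → j ≤ made.length →
    solLoopB f base made i j K cnt = solLoopQ f (base.drop i) (made.drop j) K cnt := by
  induction f with
  | zero => intros; simp [solLoopB, solLoopQ]
  | succ f ih =>
    intro base made i j K cnt hi hj
    simp only [solLoopB, solLoopQ, pvCurMin, pvPopMin]
    rw [ub_eq base made i j, getD_headD_drop base i, getD_headD_drop made j,
        show base.length - i + (made.length - j) = (base.drop i).length + (made.drop j).length
          from by simp [List.length_drop]]
    split_ifs <;> try rfl
    all_goals dsimp only
    all_goals simp only [List.tail_drop] at *
    all_goals simp only [ub_eq] at *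
    all_goals simp only [getD_headD_drop] at *
    all_goals try contradiction
    all_goals simp only [List.length_drop] at *
    -- leaf 1: both pops from base
    case _ hub1 hK hA hB hlen =>
      have h1 : i < base.length := by
        by_contra hc; exact pvTakeBase_true_ne hub1 (List.drop_eq_nil_iff.mpr (by omega))
      have h2 : i + 1 < base.length := by
        by_contra hc; exact pvTakeBase_true_ne hB (List.drop_eq_nil_iff.mpr (by omega))
      rw [ih base (made ++ [(base.drop i).headD 0 + 2 * (base.drop (i + 1)).headD 0])
            (i + 1 + 1) j K (cnt + 1) (by omega) (by simp; omega),
          List.drop_append_of_le_length hj]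
    -- leaf 2: first pop from base, second from made
    case _ hub1 hK hA hB hlen =>
      have h1 : i < base.length := by
        by_contra hc; exact pvTakeBase_true_ne hub1 (List.drop_eq_nil_iff.mpr (by omega))
      have h2 : j < made.length := by
        by_contra hc
        exact pvTakeBase_false_ne (Bool.not_eq_true _ ▸ hB)
          (by simp only [List.length_drop]; omega) (List.drop_eq_nil_iff.mpr (by omega))
      rw [ih base (made ++ [(base.drop i).headD 0 + 2 * (made.drop j).headD 0])
            (i + 1) (j + 1) K (cnt + 1) (by omega) (by simp; omega),
          List.drop_append_of_le_length (by omega : j + 1 ≤ made.length)]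
    -- leaf 3: first pop from made, second from base
    case _ hub1 hK hA hB hlen =>
      have h1 : j < made.length := by
        by_contra hc
        exact pvTakeBase_false_ne (Bool.not_eq_true _ ▸ hub1)
          (by simp only [List.length_drop]; omega) (List.drop_eq_nil_iff.mpr (by omega))
      have h2 : i < base.length := by
        by_contra hc; exact pvTakeBase_true_ne hB (List.drop_eq_nil_iff.mpr (by omega))
      rw [ih base (made ++ [(made.drop j).headD 0 + 2 * (base.drop i).headD 0])
            (i + 1) (j + 1) K (cnt + 1) (by omega) (by simp; omega),
          List.drop_append_of_le_length (by omega : j + 1 ≤ made.length)]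
    -- leaf 4: both pops from made
    case _ hub1 hK hA hB hlen =>
      have h1 : j < made.length := by
        by_contra hc
        exact pvTakeBase_false_ne (Bool.not_eq_true _ ▸ hub1)
          (by simp only [List.length_drop]; omega) (List.drop_eq_nil_iff.mpr (by omega))
      have h2 : j + 1 < made.length := by
        by_contra hc
        exact pvTakeBase_false_ne (Bool.not_eq_true _ ▸ hB)
          (by simp only [List.length_drop]; omega) (List.drop_eq_nil_iff.mpr (by omega))
      rw [ih base (made ++ [(made.drop j).headD 0 + 2 * (made.drop (j + 1)).headD 0])
            i (j + 1 + 1) K (cnt + 1) (by omega) (by simp; omega),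
          List.drop_append_of_le_length (by omega : j + 1 + 1 ≤ made.length)]

theorem heappush_sorted {s : List Int} (hs : s.Pairwise (· ≤ ·)) (c : Int) :
    (heappush s c).Pairwise (· ≤ ·) := by
  induction s with
  | nil => simp [heappush]
  | cons x t ih =>
    rw [List.pairwise_cons] at hs
    simp only [heappush]
    split
    · rename_i hxc
      rw [List.pairwise_cons]
      refine ⟨fun a ha => ?_, ih hs.2⟩
      rcases List.mem_cons.1 ((heappush_perm t c).mem_iff.1 ha) with rfl | h
      · exact hxc
      · exact hs.1 a h
    · rename_i hxc
      rw [List.pairwise_cons]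
      refine ⟨fun a ha => ?_, List.pairwise_cons.2 ⟨hs.1, hs.2⟩⟩
      rcases List.mem_cons.1 ha with rfl | h
      · omega
      · have := hs.1 a h
        omega

theorem foldl_heappush_perm (l : List Int) :
    ∀ acc : List Int, (l.foldl heappush acc).Perm (acc ++ l) := by
  induction l with
  | nil => intro acc; simp
  | cons x t ih =>
    intro acc
    simp only [List.foldl_cons]
    refine (ih (heappush acc x)).trans ?_
    exact (List.Perm.append_right t (heappush_perm acc x)).trans List.perm_middle.symm

theorem foldl_heappush_sorted (l : List Int) :
    ∀ acc : List Int, acc.Pairwise (· ≤ ·) → (l.foldl heappush acc).Pairwise (· ≤ ·) := by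
  induction l with
  | nil => intro acc h; simpa using h
  | cons x t ih =>
    intro acc h
    simp only [List.foldl_cons]
    exact ih (heappush acc x) (heappush_sorted h x)

theorem foldl_heappush_eq_sorted (l : List Int) :
    PySem.List.sorted l (fun x => x) false = l.foldl heappush [] := by
  have hperm : (l.foldl heappush []).Perm l := (foldl_heappush_perm l []).trans (by simp)
  exact PySem.List.sorted_id_eq_of_perm_of_pairwise _ _ hperm (foldl_heappush_sorted l [] (by simp))

-- ===== VERDICT (by name: the statement is the Claim_ definition above) =====
theorem solution_spec : Claim_equal_solution := by
  unfold Claim_equal_solution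
  intro scoville K _ hpre
  unfold Spec_solution
  simp only [solution, solution_alt]
  rw [foldl_heappush_eq_sorted]
  have hsorted : (scoville.foldl heappush []).Pairwise (· ≤ ·) :=
    foldl_heappush_sorted scoville [] (by simp)
  have hperm : (scoville.foldl heappush []).Perm scoville :=
    (foldl_heappush_perm scoville []).trans (by simp)
  have hne : scoville.foldl heappush [] ≠ [] := by
    intro hc
    have hl := hperm.length_eq
    rw [hc] at hl
    cases scoville with
    | nil => exact hpre rfl
    | cons a t => simp at hl
  have hinv : QInv (scoville.foldl heappush []) [] :=
    ⟨hsorted, by simp, by simp⟩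
  have hQ := loopA_eq_loopQ (scoville.foldl heappush []).length
    (scoville.foldl heappush []) [] K 0 hinv (by rw [pvMerge_nil_right]; exact hne)
  rw [pvMerge_nil_right] at hQ
  rw [loopB_eq_loopQ (scoville.foldl heappush []).length (scoville.foldl heappush []) [] 0 0 K 0
      (by omega) (by simp)]
  simpa using hQ
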